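-- pv_equiv track=rewrite | github.com/westonbrown/Cyber-AutoAgent | src/modules/prompts/report.py | format_tools_summary
-- ===== SOURCE A (Python) =====
-- from typing import Dict, List, Any
--
-- def format_tools_summary(tools_used: List[str]) -> str:
--     """
--     Format tools list into a summary.
--
--     Args:
--         tools_used: List of tool usage strings
--
--     Returns:
--         Formatted tools summary
--     """
--     if not tools_used:
--         return "No specific tools recorded."
--
--     # Count tool usage
--     tools_summary = {}
--     for tool in tools_used:
--         tool_name = tool.split(":")[0]
--         if tool_name in tools_summary:
--             tools_summary[tool_name] += 1
--         else:
--             tools_summary[tool_name] = 1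
--
--     # Format as text
--     return "\n".join([f"- {name}: {count} uses" for name, count in tools_summary.items()])
-- ===== SOURCE B (Python) =====
-- def format_tools_summary(tools_used):
--     """B: group by repeatedly splitting off the first name's whole group (filter-and-recurse), no dict and no per-name count scans."""
--     if not tools_used:
--         return "No specific tools recorded."
--     names = [t.split(":")[0] for t in tools_used]
--     lines = []
--     while names:
--         name = names[0]
--         rest = [n for n in names if n != name]
--         lines.append(f"- {name}: {len(names) - len(rest)} uses")
--         names = rest
--     return "\n".join(lines)
-- ===== Notes on version B (the rewrite author's own statement) =====
-- stated objective: alternative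
-- what changed: Replaces A's single-pass incremental dict tally with a filter-and-recurse grouping: repeatedly take the first remaining name, measure its group size as the length drop after filtering it out, and recurse on the filtered remainder.
import Mathlib
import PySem

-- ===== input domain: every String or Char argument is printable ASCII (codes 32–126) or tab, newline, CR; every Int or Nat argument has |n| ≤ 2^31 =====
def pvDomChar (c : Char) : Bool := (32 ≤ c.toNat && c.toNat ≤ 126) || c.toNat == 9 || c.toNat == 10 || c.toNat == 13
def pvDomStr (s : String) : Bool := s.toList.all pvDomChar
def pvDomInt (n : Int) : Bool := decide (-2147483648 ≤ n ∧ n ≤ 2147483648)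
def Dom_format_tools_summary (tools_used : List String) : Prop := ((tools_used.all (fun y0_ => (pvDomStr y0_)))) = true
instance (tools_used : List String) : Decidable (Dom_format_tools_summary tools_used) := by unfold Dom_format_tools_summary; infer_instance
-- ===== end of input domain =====

-- B replaces A's incremental dict tally with filter-and-recurse grouping: split off the first name's
-- whole group (its size = the length drop after filtering it out) and recurse on the remainder (objective: alternative).

-- shared helper: tool.split(":")[0]
def pvName (t : String) : String := ((PySem.Str.split? t ":").getD []).headD ""

-- ===== PORT A =====
def format_tools_summary (tools_used : List String) : String :=
  if tools_used = [] then "No specific tools recorded."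
  else
    let d := tools_used.foldl (fun d tool =>
      let name := pvName tool
      if d.contains name then d.insert name (d.getD name 0 + 1)
      else d.insert name 1) (PySem.Dict.empty : PySem.Dict String Int)
    PySem.Str.join "\n" (d.items.map (fun p => "- " ++ p.1 ++ ": " ++ PySem.Int.toStr p.2 ++ " uses"))

-- ===== PORT B =====
-- the `while names:` loop of Source B: emit the first name's line, recurse on the filtered remainder
def pvAltLoop : List String → List String
  | [] => []
  | name :: tl =>
    let rest := (name :: tl).filter (fun n => n != name)
    ("- " ++ name ++ ": " ++ PySem.Int.toStr (((name :: tl).length : Int) - (rest.length : Int)) ++ " uses")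
      :: pvAltLoop rest
termination_by names => names.length
decreasing_by
  simp only [List.filter_cons, bne_self_eq_false, List.length_cons]
  exact Nat.lt_succ_of_le (List.length_filter_le _ _)

def format_tools_summary_alt (tools_used : List String) : String :=
  if tools_used = [] then "No specific tools recorded."
  else
    let names := tools_used.map pvName
    PySem.Str.join "\n" (pvAltLoop names)

-- ===== PRECONDITION & SPEC =====
def Spec_format_tools_summary (tools_used : List String) (out : String) : Prop := out = format_tools_summary_alt tools_used
instance (tools_used : List String) (out : String) : Decidable (Spec_format_tools_summary tools_used out) := by unfold Spec_format_tools_summary; infer_instance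

-- ===== CLAIM (what is proved, stated in full; the proofs are below) =====
def Claim_equal_format_tools_summary : Prop := ∀ (tools_used : List String), Dom_format_tools_summary tools_used → Spec_format_tools_summary tools_used (format_tools_summary tools_used)

-- ===== LEMMAS AND PROOFS =====

-- A's branch-on-contains update is the uniform getD-plus-one insert
lemma step_eq (d : PySem.Dict String Int) (name : String) :
    (if d.contains name then d.insert name (d.getD name 0 + 1) else d.insert name 1)
      = d.insert name (d.getD name 0 + 1) := by
  by_cases h : d.contains name = true
  · simp [h]
  · have h' : d.contains name = false := by simpa using h
    rw [if_neg (by simp [h'])]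
    have : d.getD name 0 = 0 := by
      have := PySem.Dict.get?_eq_none_iff_contains (d := d) (k := name)
      simp [PySem.Dict.getD, this.mpr h']
    rw [this]; norm_num

-- A's counting loop builds Counter(names)
lemma dict_eq (tools_used : List String) :
    tools_used.foldl (fun d tool =>
      let name := pvName tool
      if d.contains name then d.insert name (d.getD name 0 + 1)
      else d.insert name 1) (PySem.Dict.empty : PySem.Dict String Int)
      = PySem.Dict.counter (tools_used.map pvName) := by
  have hfun : (fun (d : PySem.Dict String Int) tool =>
      let name := pvName tool
      if d.contains name then d.insert name (d.getD name 0 + 1)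
      else d.insert name 1)
      = fun d tool => d.insert (pvName tool) (d.getD (pvName tool) 0 + 1) := by
    funext d tool
    exact step_eq d (pvName tool)
  rw [hfun, ← PySem.Dict.foldl_insert_getD_add_one_eq_counter, List.foldl_map]

-- dedup commutes with removing all copies of one element
lemma ofList_filter_ne (t : List String) (x : String) :
    PySem.Set.ofList (t.filter (fun n => n != x))
      = (PySem.Set.ofList t).filter (fun n => n != x) := by
  induction t with
  | nil => rfl
  | cons a t ih =>
    by_cases hax : a = x
    · subst hax
      rw [List.filter_cons_of_neg (by simp), ih,
        PySem.Set.ofList_cons, List.filter_cons_of_neg (by simp),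
        PySem.Set.discard, List.filter_filter]
      exact (List.filter_congr (fun n _ => by cases h : n == a <;> simp [bne, h])).symm
    · rw [List.filter_cons_of_pos (by simp [hax]),
        PySem.Set.ofList_cons, PySem.Set.ofList_cons, ih,
        List.filter_cons_of_pos (by simp [hax]),
        PySem.Set.discard, PySem.Set.discard, List.filter_filter, List.filter_filter]
      exact congrArg _ (List.filter_congr (fun n _ => Bool.and_comm _ _))

-- the group-size arithmetic: length drop after filtering = count of the head
lemma len_drop_eq_count (name : String) (tl : List String) :
    (((name :: tl).length : Int)) - (((name :: tl).filter (fun n => n != name)).length : Int)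
      = (((name :: tl).count name : Int)) := by
  rw [List.filter_cons_of_neg (by simp), List.count_cons_self]
  have h1 : tl.length = (tl.filter (fun n => n != name)).length + tl.count name := by
    rw [← List.countP_eq_length_filter, List.count_eq_countP]
    have := List.length_eq_countP_add_countP (l := tl) (p := fun n => n != name)
    rw [this]
    congr 1
    exact List.countP_congr (fun n _ => by cases h : n == name <;> simp [bne, h])
  simp only [List.length_cons]
  omega

-- the B loop produces exactly the dedup-with-counts lines
lemma altLoop_eq (fuel : Nat) : ∀ (names : List String), names.length ≤ fuel →
    pvAltLoop names = (PySem.Set.ofList names).map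
      (fun k => "- " ++ k ++ ": " ++ PySem.Int.toStr ((names.count k : Int)) ++ " uses") := by
  induction fuel with
  | zero => intro names h; rw [List.length_eq_zero_iff.mp (Nat.le_zero.mp h)]; simp [pvAltLoop]
  | succ m ih =>
    intro names h
    match names with
    | [] => simp [pvAltLoop]
    | name :: tl =>
      rw [pvAltLoop]
      have hrest : (name :: tl).filter (fun n => n != name) = tl.filter (fun n => n != name) :=
        List.filter_cons_of_neg (by simp)
      have hlen : (tl.filter (fun n => n != name)).length ≤ m := by
        have := List.length_filter_le (fun n => n != name) tl
        simp only [List.length_cons] at h; omega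
      have hof : PySem.Set.ofList (name :: tl)
          = name :: PySem.Set.ofList (tl.filter (fun n => n != name)) := by
        rw [PySem.Set.ofList_cons, ofList_filter_ne]; rfl
      rw [hrest, ih _ hlen, hof, List.map_cons]
      congr 1
      · rw [← hrest, len_drop_eq_count]
      · apply List.map_congr_left
        intro k hk
        have hkmem : k ∈ tl.filter (fun n => n != name) :=
          (PySem.Set.mem_ofList _ k).mp hk
        have hkne : k ≠ name := by
          have := List.of_mem_filter hkmem
          simpa [bne] using this
        have hc : (tl.filter (fun n => n != name)).count k = (name :: tl).count k := by
          rw [List.count_filter (by simp [bne, hkne]), (List.count_cons_of_ne (Ne.symm hkne) (l:=tl)).symm]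
        rw [hc]

-- ===== VERDICT (by name: the statement is the Claim_ definition above) =====
theorem format_tools_summary_spec : Claim_equal_format_tools_summary := by
  intro tools_used _
  unfold Spec_format_tools_summary format_tools_summary format_tools_summary_alt
  by_cases h : tools_used = []
  · simp [h]
  · simp only [if_neg h, dict_eq, PySem.Dict.items_counter,
      altLoop_eq (tools_used.map pvName).length (tools_used.map pvName) le_rfl,
      List.map_map]
    rfl
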